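-- pv_equiv track=rewrite | github.com/heeralal1806/HeeralalSingh-nellore | classifier.py | detect_complaint_column
-- ===== SOURCE A (Python) =====
-- def detect_complaint_column(headers: list) -> str:
--     """Find the column containing complaint text."""
--     candidates = ['complaint', 'description', 'text', 'complaint_text',
--                   'issue', 'details', 'message', 'content']
--     headers_lower = [h.lower().strip() for h in headers]
--     for candidate in candidates:
--         if candidate in headers_lower:
--             return headers[headers_lower.index(candidate)]
--     # Fallback: return the last column (often the text field)
--     return headers[-1]
-- ===== SOURCE B (Python) =====
-- def detect_complaint_column(headers: list) -> str:
--     """Find the column containing complaint text (single pass with a priority map)."""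
--     candidates = ['complaint', 'description', 'text', 'complaint_text',
--                   'issue', 'details', 'message', 'content']
--     rank = {c: i for i, c in enumerate(candidates)}
--     best = None
--     best_rank = len(candidates)
--     for h in headers:
--         r = rank.get(h.lower().strip())
--         if r is not None and r < best_rank:
--             best_rank = r
--             best = h
--     return best if best is not None else headers[-1]
-- ===== Notes on version B (the rewrite author's own statement) =====
-- stated objective: alternative
-- what changed: Replaced the candidate-priority loop with repeated header scans (membership test plus .index per candidate) by one single pass over the headers with a precomputed rank dictionary, tracking the first header of strictly minimal rank.
import Mathlib
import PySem

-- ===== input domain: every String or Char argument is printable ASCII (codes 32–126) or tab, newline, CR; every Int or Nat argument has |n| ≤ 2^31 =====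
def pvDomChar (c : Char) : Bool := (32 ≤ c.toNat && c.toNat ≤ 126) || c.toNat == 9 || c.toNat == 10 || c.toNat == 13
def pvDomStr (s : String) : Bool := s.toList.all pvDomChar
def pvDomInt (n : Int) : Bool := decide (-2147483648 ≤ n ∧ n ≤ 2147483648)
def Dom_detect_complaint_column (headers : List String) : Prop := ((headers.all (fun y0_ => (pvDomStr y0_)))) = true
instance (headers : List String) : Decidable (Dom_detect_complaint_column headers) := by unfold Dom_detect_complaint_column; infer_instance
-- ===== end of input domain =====

-- B replaces A's candidate-priority loop with repeated header scans by one pass over the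
-- headers with a precomputed rank map, tracking the first header of strictly minimal rank (alternative algorithm).


-- ===== PORT A =====
def pvCandidatesA : List String :=
  ["complaint", "description", "text", "complaint_text",
   "issue", "details", "message", "content"]

-- the 'for candidate in candidates: if candidate in headers_lower: return …' loop
def pvLoopA (headers hl : List String) : List String → String
  | [] => (PySem.List.pyGet? headers (-1)).getD ""          -- headers[-1]; Pre_ excludes the none case
  | c :: cs =>
      if hl.contains c then
        (PySem.List.pyGet? headers (((PySem.List.index? hl c).getD 0 : Nat) : Int)).getD ""
      else pvLoopA headers hl cs

def detect_complaint_column (headers : List String) : String :=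
  let hl := headers.map (fun h => PySem.Str.strip (PySem.Str.lower h))
  pvLoopA headers hl pvCandidatesA

-- ===== PORT B =====
def pvCandidatesB : List String :=
  ["complaint", "description", "text", "complaint_text",
   "issue", "details", "message", "content"]

-- rank = {c: i for i, c in enumerate(candidates)}
def pvRankB : PySem.Dict String Int :=
  (PySem.List.enumerate pvCandidatesB).foldl (fun d p => d.insert p.2 p.1) PySem.Dict.empty

-- the single pass: state (best_rank, best)
def pvStepB (st : Int × Option String) (h : String) : Int × Option String :=
  match pvRankB.get? (PySem.Str.strip (PySem.Str.lower h)) with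
  | some r => if r < st.1 then (r, some h) else st
  | none => st

def detect_complaint_column_alt (headers : List String) : String :=
  let st := headers.foldl pvStepB (((pvCandidatesB.length : Nat) : Int), none)
  match st.2 with
  | some b => b
  | none => (PySem.List.pyGet? headers (-1)).getD ""

-- ===== PRECONDITION & SPEC =====
-- A raises IndexError (headers[-1]) exactly on the empty list; Pre_ excludes it.
def Pre_detect_complaint_column (headers : List String) : Prop := headers ≠ []
instance (headers : List String) : Decidable (Pre_detect_complaint_column headers) := by
  unfold Pre_detect_complaint_column; infer_instance
def pvWitness_detect_complaint_column : List String := ["id", " Complaint "]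

def Spec_detect_complaint_column (headers : List String) (out : String) : Prop := out = detect_complaint_column_alt headers
instance (headers : List String) (out : String) : Decidable (Spec_detect_complaint_column headers out) := by unfold Spec_detect_complaint_column; infer_instance

-- ===== CLAIM (what is proved, stated in full; the proofs are below) =====
def Claim_equal_detect_complaint_column : Prop := ∀ (headers : List String), Dom_detect_complaint_column headers → Pre_detect_complaint_column headers → Spec_detect_complaint_column headers (detect_complaint_column headers)

-- ===== LEMMAS AND PROOFS =====

-- the lower-then-strip key both programs compute
def pvKey (h : String) : String := PySem.Str.strip (PySem.Str.lower h)
-- rank of a header (B's dict lookup)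
def pvRkOf (h : String) : Option Int := pvRankB.get? (pvKey h)
-- ranks present among the headers
def pvPresent (hs : List String) : List Int := hs.filterMap pvRkOf
-- running minimum of the present ranks
def pvMinp (hs : List String) (r0 : Int) : Int := (pvPresent hs).foldl min r0

theorem pvRank_get (s : String) :
    pvRankB.get? s =
      if s = "complaint" then some 0 else if s = "description" then some 1
      else if s = "text" then some 2 else if s = "complaint_text" then some 3
      else if s = "issue" then some 4 else if s = "details" then some 5
      else if s = "message" then some 6 else if s = "content" then some 7 else none := by
  simp only [pvRankB, pvCandidatesB, PySem.List.enumerate_cons, PySem.List.enumerate_nil,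
    List.foldl_cons, List.foldl_nil, PySem.Dict.get?_insert, PySem.Dict.get?_empty]
  norm_num
  split_ifs <;> simp_all

theorem pvFoldl_min_le_init (l : List Int) (a : Int) : l.foldl min a ≤ a := by
  induction l generalizing a with
  | nil => simp
  | cons x t ih => exact le_trans (ih (min a x)) (min_le_left a x)

theorem pvFoldl_min_choice (l : List Int) (a : Int) : l.foldl min a = a ∨ l.foldl min a ∈ l := by
  induction l generalizing a with
  | nil => simp
  | cons x t ih =>
    rcases ih (min a x) with h | h
    · simp only [List.foldl_cons, h]
      rcases le_total a x with hx | hx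
      · left; simp [min_eq_left hx]
      · right; simp [min_eq_right hx]
    · right; simp [List.foldl_cons, h]

theorem pvFoldl_min_le_mem (l : List Int) (a b : Int) (hb : b ∈ l) : l.foldl min a ≤ b := by
  induction l generalizing a with
  | nil => simp at hb
  | cons x t ih =>
    simp only [List.mem_cons] at hb
    rcases hb with rfl | hb
    · exact le_trans (pvFoldl_min_le_init t (min a b)) (min_le_right a b)
    · exact ih (min a x) hb

-- characterization of B's fold
theorem pvFoldB_spec (hs : List String) (r0 : Int) (b0 : Option String) :
    hs.foldl pvStepB (r0, b0) =
      (pvMinp hs r0,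
       if pvMinp hs r0 < r0 then hs.find? (fun h => pvRkOf h == some (pvMinp hs r0)) else b0) := by
  induction hs generalizing r0 b0 with
  | nil => simp [pvMinp, pvPresent]
  | cons h t ih =>
    cases hr : pvRkOf h with
    | none =>
      have hstep : pvStepB (r0, b0) h = (r0, b0) := by
        unfold pvStepB
        rw [show pvRankB.get? (PySem.Str.strip (PySem.Str.lower h)) = pvRkOf h from rfl, hr]
      rw [List.foldl_cons, hstep]
      have hp : pvPresent (h :: t) = pvPresent t := by simp [pvPresent, hr]
      have hm : pvMinp (h :: t) r0 = pvMinp t r0 := by simp [pvMinp, hp]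
      rw [hm, List.find?_cons_of_neg (p := fun h' => pvRkOf h' == some (pvMinp t r0)) (a := h) (l := t) (by simp [hr]), ih]
    | some r =>
      have hstep : pvStepB (r0, b0) h = if r < r0 then (r, some h) else (r0, b0) := by
        unfold pvStepB
        rw [show pvRankB.get? (PySem.Str.strip (PySem.Str.lower h)) = pvRkOf h from rfl, hr]
      rw [List.foldl_cons, hstep]
      have hp : pvPresent (h :: t) = r :: pvPresent t := by simp [pvPresent, hr]
      have hm : ∀ a, pvMinp (h :: t) a = pvMinp t (min a r) := by
        intro a; simp [pvMinp, hp]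
      by_cases hlt : r < r0
      · -- r < r0 : accumulator becomes (r, some h)
        rw [if_pos hlt, ih]
        have hmin : min r0 r = r := min_eq_right (le_of_lt hlt)
        have hM : pvMinp (h :: t) r0 = pvMinp t r := by rw [hm, hmin]
        have hle : pvMinp t r ≤ r := pvFoldl_min_le_init _ _
        rw [hM]
        have hc2 : pvMinp t r < r0 := lt_of_le_of_lt hle hlt
        rw [if_pos hc2]
        by_cases hsc : pvMinp t r < r
        · rw [if_pos hsc]
          rw [List.find?_cons_of_neg (p := fun h' => pvRkOf h' == some (pvMinp t r)) (a := h) (l := t) (by simp [hr]; omega)]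
        · have heq : pvMinp t r = r := le_antisymm hle (not_lt.mp hsc)
          rw [if_neg hsc, heq]
          rw [List.find?_cons_of_pos (p := fun h' => pvRkOf h' == some r) (a := h) (l := t) (by simp [hr])]
      · -- r0 ≤ r : accumulator unchanged
        rw [if_neg hlt, ih]
        have hmin : min r0 r = r0 := min_eq_left (not_lt.mp hlt)
        have hM : pvMinp (h :: t) r0 = pvMinp t r0 := by rw [hm, hmin]
        rw [hM]
        by_cases hc : pvMinp t r0 < r0
        · rw [if_pos hc, if_pos hc]
          rw [List.find?_cons_of_neg (p := fun h' => pvRkOf h' == some (pvMinp t r0)) (a := h) (l := t) (by simp [hr]; omega)]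
        · rw [if_neg hc, if_neg hc]

-- membership of a rank in pvPresent
theorem pvMem_present (hs : List String) (r : Int) :
    r ∈ pvPresent hs ↔ ∃ h ∈ hs, pvRkOf h = some r := by
  simp [pvPresent, List.mem_filterMap]

-- index-into-headers via the mapped list equals find? on headers
theorem pvIndex_map_find (f : String → String) (l : List String) (c : String) (k : Nat)
    (hk : PySem.List.index? (l.map f) c = some k) :
    l[k]? = l.find? (fun h => f h == c) := by
  induction l generalizing k with
  | nil => simp [PySem.List.index?] at hk
  | cons h t ih =>
    by_cases hc : f h = c
    · rw [List.map_cons, hc, PySem.List.index?_cons_self] at hk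
      cases hk
      simp [hc]
    · rw [List.map_cons, PySem.List.index?_cons_of_ne (t.map f) hc] at hk
      cases hkk : PySem.List.index? (t.map f) c with
      | none => rw [hkk] at hk; simp at hk
      | some k' =>
        rw [hkk] at hk
        simp only [Option.map_some] at hk
        cases hk
        have : (fun h => f h == c) h = false := by simpa using hc
        simp only [List.find?_cons, this, List.getElem?_cons_succ]
        exact ih k' hkk

theorem pvIff_0 (s : String) : pvRankB.get? s = some 0 ↔ s = "complaint" := by
  rw [pvRank_get]; split_ifs <;> simp_all

theorem pvIff_1 (s : String) : pvRankB.get? s = some 1 ↔ s = "description" := by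
  rw [pvRank_get]; split_ifs <;> simp_all

theorem pvIff_2 (s : String) : pvRankB.get? s = some 2 ↔ s = "text" := by
  rw [pvRank_get]; split_ifs <;> simp_all

theorem pvIff_3 (s : String) : pvRankB.get? s = some 3 ↔ s = "complaint_text" := by
  rw [pvRank_get]; split_ifs <;> simp_all

theorem pvIff_4 (s : String) : pvRankB.get? s = some 4 ↔ s = "issue" := by
  rw [pvRank_get]; split_ifs <;> simp_all

theorem pvIff_5 (s : String) : pvRankB.get? s = some 5 ↔ s = "details" := by
  rw [pvRank_get]; split_ifs <;> simp_all

theorem pvIff_6 (s : String) : pvRankB.get? s = some 6 ↔ s = "message" := by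
  rw [pvRank_get]; split_ifs <;> simp_all

theorem pvIff_7 (s : String) : pvRankB.get? s = some 7 ↔ s = "content" := by
  rw [pvRank_get]; split_ifs <;> simp_all

-- ranks handed out by the dict are exactly 0..7
theorem pvRk_range (h : String) (r : Int) (hr : pvRkOf h = some r) : 0 ≤ r ∧ r < 8 := by
  unfold pvRkOf at hr
  rw [pvRank_get] at hr
  split_ifs at hr <;> simp_all <;> omega

-- characterization of A's candidate loop
theorem pvLoopA_spec (headers hl cs : List String) :
    pvLoopA headers hl cs =
      match cs.find? (fun c => hl.contains c) with
      | some c => (PySem.List.pyGet? headers (((PySem.List.index? hl c).getD 0 : Nat) : Int)).getD ""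
      | none => (PySem.List.pyGet? headers (-1)).getD "" := by
  induction cs with
  | nil => rfl
  | cons c cs ih =>
    by_cases hc : hl.contains c = true
    · simp only [pvLoopA]
      rw [if_pos hc, List.find?_cons_of_pos (p := fun c => hl.contains c) hc]
    · simp only [pvLoopA]
      rw [if_neg hc, List.find?_cons_of_neg (p := fun c => hl.contains c) hc, ih]

-- the common shape of each found-candidate case
theorem pvCaseLemma (headers : List String) (c : String) (k : Int)
    (hiff : ∀ s, pvRankB.get? s = some k ↔ s = c)
    (hfind : pvCandidatesA.find? (fun c' => (headers.map pvKey).contains c') = some c) :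
    pvLoopA headers (headers.map pvKey) pvCandidatesA
      = match headers.find? (fun h => pvRkOf h == some k) with
        | some b => b
        | none => (PySem.List.pyGet? headers (-1)).getD "" := by
  have hcont : (headers.map pvKey).contains c = true := by simpa using List.find?_some hfind
  have hmemc : c ∈ headers.map pvKey := by simpa using hcont
  obtain ⟨j, hj⟩ : ∃ j, PySem.List.index? (headers.map pvKey) c = some j := by
    have hs := (PySem.List.index?_isSome_iff (headers.map pvKey) c).mpr hmemc
    exact Option.isSome_iff_exists.mp hs
  have hpeq : (fun h => pvRkOf h == some k) = (fun h => pvKey h == c) := by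
    funext h
    rcases Bool.eq_false_or_eq_true (pvKey h == c) with hb | hb
    · have heq : pvKey h = c := by simpa using hb
      have hsk : pvRkOf h = some k := by unfold pvRkOf; exact (hiff _).mpr heq
      simp [hb, hsk]
    · have hne : pvKey h ≠ c := by simpa using hb
      have hns : pvRkOf h ≠ some k := by
        intro hcon; exact hne ((hiff _).mp hcon)
      simp [hb, hns]
  obtain ⟨h0, hh0, hkey⟩ := List.mem_map.mp hmemc
  obtain ⟨b, hb⟩ : ∃ b, headers.find? (fun h => pvKey h == c) = some b := by
    have hs : (headers.find? (fun h => pvKey h == c)).isSome := by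
      rw [List.find?_isSome]; exact ⟨h0, hh0, by simp [hkey]⟩
    exact Option.isSome_iff_exists.mp hs
  rw [pvLoopA_spec, hfind]
  show (PySem.List.pyGet? headers (((PySem.List.index? (headers.map pvKey) c).getD 0 : Nat) : Int)).getD ""
      = match headers.find? (fun h => pvRkOf h == some k) with
        | some b => b
        | none => (PySem.List.pyGet? headers (-1)).getD ""
  rw [hpeq, hb, hj]
  show (PySem.List.pyGet? headers ((j : Nat) : Int)).getD "" = b
  rw [PySem.List.pyGet?_natCast, pvIndex_map_find pvKey headers c j hj, hb]
  rfl

-- the two ports agree on every input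
theorem pvMain (headers : List String) :
    detect_complaint_column headers = detect_complaint_column_alt headers := by
  show pvLoopA headers (headers.map pvKey) pvCandidatesA
      = match (headers.foldl pvStepB ((8 : Int), none)).2 with
        | some b => b
        | none => (PySem.List.pyGet? headers (-1)).getD ""
  rw [pvFoldB_spec]
  show pvLoopA headers (headers.map pvKey) pvCandidatesA
      = match (if pvMinp headers 8 < 8
                then headers.find? (fun h => pvRkOf h == some (pvMinp headers 8)) else none) with
        | some b => b
        | none => (PySem.List.pyGet? headers (-1)).getD ""
  have hMle : ∀ r ∈ pvPresent headers, pvMinp headers 8 ≤ r :=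
    fun r hr => pvFoldl_min_le_mem (pvPresent headers) 8 r hr
  rcases pvFoldl_min_choice (pvPresent headers) 8 with hM | hM
  · -- no candidate occurs among the headers: both return headers[-1]
    have hM' : pvMinp headers 8 = 8 := hM
    have hfn : pvCandidatesA.find? (fun c' => (headers.map pvKey).contains c') = none := by
      rw [List.find?_eq_none]
      intro c hc hcont
      obtain ⟨h0, hh0, hkey⟩ := List.mem_map.mp (by simpa using hcont)
      obtain ⟨k, hk⟩ : ∃ k, pvRankB.get? c = some k := by
        simp only [pvCandidatesA] at hc
        fin_cases hc <;> exact ⟨_, rfl⟩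
      have hrk : pvRkOf h0 = some k := by unfold pvRkOf; rw [hkey]; exact hk
      have hle := hMle k ((pvMem_present headers k).mpr ⟨h0, hh0, hrk⟩)
      have hb := (pvRk_range h0 k hrk).2
      omega
    rw [pvLoopA_spec, hfn, if_neg (by omega)]
  · -- some candidate occurs: both return the first header of minimal rank
    have hM' : pvMinp headers 8 ∈ pvPresent headers := hM
    obtain ⟨h0, hh0, hrk0⟩ := (pvMem_present headers (pvMinp headers 8)).mp hM'
    obtain ⟨hge, hlt8⟩ := pvRk_range h0 (pvMinp headers 8) hrk0
    rw [if_pos hlt8]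
    have h8 : pvMinp headers 8 = 0 ∨ pvMinp headers 8 = 1 ∨ pvMinp headers 8 = 2 ∨
        pvMinp headers 8 = 3 ∨ pvMinp headers 8 = 4 ∨ pvMinp headers 8 = 5 ∨
        pvMinp headers 8 = 6 ∨ pvMinp headers 8 = 7 := by omega
    rcases h8 with hMk | hMk | hMk | hMk | hMk | hMk | hMk | hMk
    · -- pvMinp headers 8 = 0
      rw [hMk] at hrk0 ⊢
      have hkey : pvKey h0 = "complaint" := (pvIff_0 (pvKey h0)).mp hrk0
      have hcontk : ((headers.map pvKey).contains "complaint" = true) := by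
        simp only [List.contains_iff_mem, List.mem_map]
        exact ⟨h0, hh0, hkey⟩
      refine pvCaseLemma headers "complaint" 0 pvIff_0 ?_
      simp only [pvCandidatesA]
      rw [List.find?_cons_of_pos (p := fun c' => (headers.map pvKey).contains c') (a := "complaint") hcontk]
    · -- pvMinp headers 8 = 1
      rw [hMk] at hrk0 ⊢
      have hkey : pvKey h0 = "description" := (pvIff_1 (pvKey h0)).mp hrk0
      have hcontk : ((headers.map pvKey).contains "description" = true) := by
        simp only [List.contains_iff_mem, List.mem_map]
        exact ⟨h0, hh0, hkey⟩
      refine pvCaseLemma headers "description" 1 pvIff_1 ?_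
      have hno0 : ¬ ((headers.map pvKey).contains "complaint" = true) := by
        intro hc
        obtain ⟨hj, hhj, hkeyj⟩ := List.mem_map.mp (by simpa using hc)
        have hrkj : pvRkOf hj = some 0 := by unfold pvRkOf; rw [hkeyj, pvRank_get]; simp
        have := hMle 0 ((pvMem_present headers 0).mpr ⟨hj, hhj, hrkj⟩)
        omega
      simp only [pvCandidatesA]
      rw [List.find?_cons_of_neg (p := fun c' => (headers.map pvKey).contains c') (a := "complaint") hno0,
        List.find?_cons_of_pos (p := fun c' => (headers.map pvKey).contains c') (a := "description") hcontk]
    · -- pvMinp headers 8 = 2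
      rw [hMk] at hrk0 ⊢
      have hkey : pvKey h0 = "text" := (pvIff_2 (pvKey h0)).mp hrk0
      have hcontk : ((headers.map pvKey).contains "text" = true) := by
        simp only [List.contains_iff_mem, List.mem_map]
        exact ⟨h0, hh0, hkey⟩
      refine pvCaseLemma headers "text" 2 pvIff_2 ?_
      have hno0 : ¬ ((headers.map pvKey).contains "complaint" = true) := by
        intro hc
        obtain ⟨hj, hhj, hkeyj⟩ := List.mem_map.mp (by simpa using hc)
        have hrkj : pvRkOf hj = some 0 := by unfold pvRkOf; rw [hkeyj, pvRank_get]; simp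
        have := hMle 0 ((pvMem_present headers 0).mpr ⟨hj, hhj, hrkj⟩)
        omega
      have hno1 : ¬ ((headers.map pvKey).contains "description" = true) := by
        intro hc
        obtain ⟨hj, hhj, hkeyj⟩ := List.mem_map.mp (by simpa using hc)
        have hrkj : pvRkOf hj = some 1 := by unfold pvRkOf; rw [hkeyj, pvRank_get]; simp
        have := hMle 1 ((pvMem_present headers 1).mpr ⟨hj, hhj, hrkj⟩)
        omega
      simp only [pvCandidatesA]
      rw [List.find?_cons_of_neg (p := fun c' => (headers.map pvKey).contains c') (a := "complaint") hno0,
        List.find?_cons_of_neg (p := fun c' => (headers.map pvKey).contains c') (a := "description") hno1,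
        List.find?_cons_of_pos (p := fun c' => (headers.map pvKey).contains c') (a := "text") hcontk]
    · -- pvMinp headers 8 = 3
      rw [hMk] at hrk0 ⊢
      have hkey : pvKey h0 = "complaint_text" := (pvIff_3 (pvKey h0)).mp hrk0
      have hcontk : ((headers.map pvKey).contains "complaint_text" = true) := by
        simp only [List.contains_iff_mem, List.mem_map]
        exact ⟨h0, hh0, hkey⟩
      refine pvCaseLemma headers "complaint_text" 3 pvIff_3 ?_
      have hno0 : ¬ ((headers.map pvKey).contains "complaint" = true) := by
        intro hc
        obtain ⟨hj, hhj, hkeyj⟩ := List.mem_map.mp (by simpa using hc)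
        have hrkj : pvRkOf hj = some 0 := by unfold pvRkOf; rw [hkeyj, pvRank_get]; simp
        have := hMle 0 ((pvMem_present headers 0).mpr ⟨hj, hhj, hrkj⟩)
        omega
      have hno1 : ¬ ((headers.map pvKey).contains "description" = true) := by
        intro hc
        obtain ⟨hj, hhj, hkeyj⟩ := List.mem_map.mp (by simpa using hc)
        have hrkj : pvRkOf hj = some 1 := by unfold pvRkOf; rw [hkeyj, pvRank_get]; simp
        have := hMle 1 ((pvMem_present headers 1).mpr ⟨hj, hhj, hrkj⟩)
        omega
      have hno2 : ¬ ((headers.map pvKey).contains "text" = true) := by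
        intro hc
        obtain ⟨hj, hhj, hkeyj⟩ := List.mem_map.mp (by simpa using hc)
        have hrkj : pvRkOf hj = some 2 := by unfold pvRkOf; rw [hkeyj, pvRank_get]; simp
        have := hMle 2 ((pvMem_present headers 2).mpr ⟨hj, hhj, hrkj⟩)
        omega
      simp only [pvCandidatesA]
      rw [List.find?_cons_of_neg (p := fun c' => (headers.map pvKey).contains c') (a := "complaint") hno0,
        List.find?_cons_of_neg (p := fun c' => (headers.map pvKey).contains c') (a := "description") hno1,
        List.find?_cons_of_neg (p := fun c' => (headers.map pvKey).contains c') (a := "text") hno2,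
        List.find?_cons_of_pos (p := fun c' => (headers.map pvKey).contains c') (a := "complaint_text") hcontk]
    · -- pvMinp headers 8 = 4
      rw [hMk] at hrk0 ⊢
      have hkey : pvKey h0 = "issue" := (pvIff_4 (pvKey h0)).mp hrk0
      have hcontk : ((headers.map pvKey).contains "issue" = true) := by
        simp only [List.contains_iff_mem, List.mem_map]
        exact ⟨h0, hh0, hkey⟩
      refine pvCaseLemma headers "issue" 4 pvIff_4 ?_
      have hno0 : ¬ ((headers.map pvKey).contains "complaint" = true) := by
        intro hc
        obtain ⟨hj, hhj, hkeyj⟩ := List.mem_map.mp (by simpa using hc)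
        have hrkj : pvRkOf hj = some 0 := by unfold pvRkOf; rw [hkeyj, pvRank_get]; simp
        have := hMle 0 ((pvMem_present headers 0).mpr ⟨hj, hhj, hrkj⟩)
        omega
      have hno1 : ¬ ((headers.map pvKey).contains "description" = true) := by
        intro hc
        obtain ⟨hj, hhj, hkeyj⟩ := List.mem_map.mp (by simpa using hc)
        have hrkj : pvRkOf hj = some 1 := by unfold pvRkOf; rw [hkeyj, pvRank_get]; simp
        have := hMle 1 ((pvMem_present headers 1).mpr ⟨hj, hhj, hrkj⟩)
        omega
      have hno2 : ¬ ((headers.map pvKey).contains "text" = true) := by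
        intro hc
        obtain ⟨hj, hhj, hkeyj⟩ := List.mem_map.mp (by simpa using hc)
        have hrkj : pvRkOf hj = some 2 := by unfold pvRkOf; rw [hkeyj, pvRank_get]; simp
        have := hMle 2 ((pvMem_present headers 2).mpr ⟨hj, hhj, hrkj⟩)
        omega
      have hno3 : ¬ ((headers.map pvKey).contains "complaint_text" = true) := by
        intro hc
        obtain ⟨hj, hhj, hkeyj⟩ := List.mem_map.mp (by simpa using hc)
        have hrkj : pvRkOf hj = some 3 := by unfold pvRkOf; rw [hkeyj, pvRank_get]; simp
        have := hMle 3 ((pvMem_present headers 3).mpr ⟨hj, hhj, hrkj⟩)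
        omega
      simp only [pvCandidatesA]
      rw [List.find?_cons_of_neg (p := fun c' => (headers.map pvKey).contains c') (a := "complaint") hno0,
        List.find?_cons_of_neg (p := fun c' => (headers.map pvKey).contains c') (a := "description") hno1,
        List.find?_cons_of_neg (p := fun c' => (headers.map pvKey).contains c') (a := "text") hno2,
        List.find?_cons_of_neg (p := fun c' => (headers.map pvKey).contains c') (a := "complaint_text") hno3,
        List.find?_cons_of_pos (p := fun c' => (headers.map pvKey).contains c') (a := "issue") hcontk]
    · -- pvMinp headers 8 = 5
      rw [hMk] at hrk0 ⊢
      have hkey : pvKey h0 = "details" := (pvIff_5 (pvKey h0)).mp hrk0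
      have hcontk : ((headers.map pvKey).contains "details" = true) := by
        simp only [List.contains_iff_mem, List.mem_map]
        exact ⟨h0, hh0, hkey⟩
      refine pvCaseLemma headers "details" 5 pvIff_5 ?_
      have hno0 : ¬ ((headers.map pvKey).contains "complaint" = true) := by
        intro hc
        obtain ⟨hj, hhj, hkeyj⟩ := List.mem_map.mp (by simpa using hc)
        have hrkj : pvRkOf hj = some 0 := by unfold pvRkOf; rw [hkeyj, pvRank_get]; simp
        have := hMle 0 ((pvMem_present headers 0).mpr ⟨hj, hhj, hrkj⟩)
        omega
      have hno1 : ¬ ((headers.map pvKey).contains "description" = true) := by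
        intro hc
        obtain ⟨hj, hhj, hkeyj⟩ := List.mem_map.mp (by simpa using hc)
        have hrkj : pvRkOf hj = some 1 := by unfold pvRkOf; rw [hkeyj, pvRank_get]; simp
        have := hMle 1 ((pvMem_present headers 1).mpr ⟨hj, hhj, hrkj⟩)
        omega
      have hno2 : ¬ ((headers.map pvKey).contains "text" = true) := by
        intro hc
        obtain ⟨hj, hhj, hkeyj⟩ := List.mem_map.mp (by simpa using hc)
        have hrkj : pvRkOf hj = some 2 := by unfold pvRkOf; rw [hkeyj, pvRank_get]; simp
        have := hMle 2 ((pvMem_present headers 2).mpr ⟨hj, hhj, hrkj⟩)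
        omega
      have hno3 : ¬ ((headers.map pvKey).contains "complaint_text" = true) := by
        intro hc
        obtain ⟨hj, hhj, hkeyj⟩ := List.mem_map.mp (by simpa using hc)
        have hrkj : pvRkOf hj = some 3 := by unfold pvRkOf; rw [hkeyj, pvRank_get]; simp
        have := hMle 3 ((pvMem_present headers 3).mpr ⟨hj, hhj, hrkj⟩)
        omega
      have hno4 : ¬ ((headers.map pvKey).contains "issue" = true) := by
        intro hc
        obtain ⟨hj, hhj, hkeyj⟩ := List.mem_map.mp (by simpa using hc)
        have hrkj : pvRkOf hj = some 4 := by unfold pvRkOf; rw [hkeyj, pvRank_get]; simp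
        have := hMle 4 ((pvMem_present headers 4).mpr ⟨hj, hhj, hrkj⟩)
        omega
      simp only [pvCandidatesA]
      rw [List.find?_cons_of_neg (p := fun c' => (headers.map pvKey).contains c') (a := "complaint") hno0,
        List.find?_cons_of_neg (p := fun c' => (headers.map pvKey).contains c') (a := "description") hno1,
        List.find?_cons_of_neg (p := fun c' => (headers.map pvKey).contains c') (a := "text") hno2,
        List.find?_cons_of_neg (p := fun c' => (headers.map pvKey).contains c') (a := "complaint_text") hno3,
        List.find?_cons_of_neg (p := fun c' => (headers.map pvKey).contains c') (a := "issue") hno4,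
        List.find?_cons_of_pos (p := fun c' => (headers.map pvKey).contains c') (a := "details") hcontk]
    · -- pvMinp headers 8 = 6
      rw [hMk] at hrk0 ⊢
      have hkey : pvKey h0 = "message" := (pvIff_6 (pvKey h0)).mp hrk0
      have hcontk : ((headers.map pvKey).contains "message" = true) := by
        simp only [List.contains_iff_mem, List.mem_map]
        exact ⟨h0, hh0, hkey⟩
      refine pvCaseLemma headers "message" 6 pvIff_6 ?_
      have hno0 : ¬ ((headers.map pvKey).contains "complaint" = true) := by
        intro hc
        obtain ⟨hj, hhj, hkeyj⟩ := List.mem_map.mp (by simpa using hc)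
        have hrkj : pvRkOf hj = some 0 := by unfold pvRkOf; rw [hkeyj, pvRank_get]; simp
        have := hMle 0 ((pvMem_present headers 0).mpr ⟨hj, hhj, hrkj⟩)
        omega
      have hno1 : ¬ ((headers.map pvKey).contains "description" = true) := by
        intro hc
        obtain ⟨hj, hhj, hkeyj⟩ := List.mem_map.mp (by simpa using hc)
        have hrkj : pvRkOf hj = some 1 := by unfold pvRkOf; rw [hkeyj, pvRank_get]; simp
        have := hMle 1 ((pvMem_present headers 1).mpr ⟨hj, hhj, hrkj⟩)
        omega
      have hno2 : ¬ ((headers.map pvKey).contains "text" = true) := by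
        intro hc
        obtain ⟨hj, hhj, hkeyj⟩ := List.mem_map.mp (by simpa using hc)
        have hrkj : pvRkOf hj = some 2 := by unfold pvRkOf; rw [hkeyj, pvRank_get]; simp
        have := hMle 2 ((pvMem_present headers 2).mpr ⟨hj, hhj, hrkj⟩)
        omega
      have hno3 : ¬ ((headers.map pvKey).contains "complaint_text" = true) := by
        intro hc
        obtain ⟨hj, hhj, hkeyj⟩ := List.mem_map.mp (by simpa using hc)
        have hrkj : pvRkOf hj = some 3 := by unfold pvRkOf; rw [hkeyj, pvRank_get]; simp
        have := hMle 3 ((pvMem_present headers 3).mpr ⟨hj, hhj, hrkj⟩)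
        omega
      have hno4 : ¬ ((headers.map pvKey).contains "issue" = true) := by
        intro hc
        obtain ⟨hj, hhj, hkeyj⟩ := List.mem_map.mp (by simpa using hc)
        have hrkj : pvRkOf hj = some 4 := by unfold pvRkOf; rw [hkeyj, pvRank_get]; simp
        have := hMle 4 ((pvMem_present headers 4).mpr ⟨hj, hhj, hrkj⟩)
        omega
      have hno5 : ¬ ((headers.map pvKey).contains "details" = true) := by
        intro hc
        obtain ⟨hj, hhj, hkeyj⟩ := List.mem_map.mp (by simpa using hc)
        have hrkj : pvRkOf hj = some 5 := by unfold pvRkOf; rw [hkeyj, pvRank_get]; simp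
        have := hMle 5 ((pvMem_present headers 5).mpr ⟨hj, hhj, hrkj⟩)
        omega
      simp only [pvCandidatesA]
      rw [List.find?_cons_of_neg (p := fun c' => (headers.map pvKey).contains c') (a := "complaint") hno0,
        List.find?_cons_of_neg (p := fun c' => (headers.map pvKey).contains c') (a := "description") hno1,
        List.find?_cons_of_neg (p := fun c' => (headers.map pvKey).contains c') (a := "text") hno2,
        List.find?_cons_of_neg (p := fun c' => (headers.map pvKey).contains c') (a := "complaint_text") hno3,
        List.find?_cons_of_neg (p := fun c' => (headers.map pvKey).contains c') (a := "issue") hno4,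
        List.find?_cons_of_neg (p := fun c' => (headers.map pvKey).contains c') (a := "details") hno5,
        List.find?_cons_of_pos (p := fun c' => (headers.map pvKey).contains c') (a := "message") hcontk]
    · -- pvMinp headers 8 = 7
      rw [hMk] at hrk0 ⊢
      have hkey : pvKey h0 = "content" := (pvIff_7 (pvKey h0)).mp hrk0
      have hcontk : ((headers.map pvKey).contains "content" = true) := by
        simp only [List.contains_iff_mem, List.mem_map]
        exact ⟨h0, hh0, hkey⟩
      refine pvCaseLemma headers "content" 7 pvIff_7 ?_
      have hno0 : ¬ ((headers.map pvKey).contains "complaint" = true) := by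
        intro hc
        obtain ⟨hj, hhj, hkeyj⟩ := List.mem_map.mp (by simpa using hc)
        have hrkj : pvRkOf hj = some 0 := by unfold pvRkOf; rw [hkeyj, pvRank_get]; simp
        have := hMle 0 ((pvMem_present headers 0).mpr ⟨hj, hhj, hrkj⟩)
        omega
      have hno1 : ¬ ((headers.map pvKey).contains "description" = true) := by
        intro hc
        obtain ⟨hj, hhj, hkeyj⟩ := List.mem_map.mp (by simpa using hc)
        have hrkj : pvRkOf hj = some 1 := by unfold pvRkOf; rw [hkeyj, pvRank_get]; simp
        have := hMle 1 ((pvMem_present headers 1).mpr ⟨hj, hhj, hrkj⟩)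
        omega
      have hno2 : ¬ ((headers.map pvKey).contains "text" = true) := by
        intro hc
        obtain ⟨hj, hhj, hkeyj⟩ := List.mem_map.mp (by simpa using hc)
        have hrkj : pvRkOf hj = some 2 := by unfold pvRkOf; rw [hkeyj, pvRank_get]; simp
        have := hMle 2 ((pvMem_present headers 2).mpr ⟨hj, hhj, hrkj⟩)
        omega
      have hno3 : ¬ ((headers.map pvKey).contains "complaint_text" = true) := by
        intro hc
        obtain ⟨hj, hhj, hkeyj⟩ := List.mem_map.mp (by simpa using hc)
        have hrkj : pvRkOf hj = some 3 := by unfold pvRkOf; rw [hkeyj, pvRank_get]; simp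
        have := hMle 3 ((pvMem_present headers 3).mpr ⟨hj, hhj, hrkj⟩)
        omega
      have hno4 : ¬ ((headers.map pvKey).contains "issue" = true) := by
        intro hc
        obtain ⟨hj, hhj, hkeyj⟩ := List.mem_map.mp (by simpa using hc)
        have hrkj : pvRkOf hj = some 4 := by unfold pvRkOf; rw [hkeyj, pvRank_get]; simp
        have := hMle 4 ((pvMem_present headers 4).mpr ⟨hj, hhj, hrkj⟩)
        omega
      have hno5 : ¬ ((headers.map pvKey).contains "details" = true) := by
        intro hc
        obtain ⟨hj, hhj, hkeyj⟩ := List.mem_map.mp (by simpa using hc)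
        have hrkj : pvRkOf hj = some 5 := by unfold pvRkOf; rw [hkeyj, pvRank_get]; simp
        have := hMle 5 ((pvMem_present headers 5).mpr ⟨hj, hhj, hrkj⟩)
        omega
      have hno6 : ¬ ((headers.map pvKey).contains "message" = true) := by
        intro hc
        obtain ⟨hj, hhj, hkeyj⟩ := List.mem_map.mp (by simpa using hc)
        have hrkj : pvRkOf hj = some 6 := by unfold pvRkOf; rw [hkeyj, pvRank_get]; simp
        have := hMle 6 ((pvMem_present headers 6).mpr ⟨hj, hhj, hrkj⟩)
        omega
      simp only [pvCandidatesA]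
      rw [List.find?_cons_of_neg (p := fun c' => (headers.map pvKey).contains c') (a := "complaint") hno0,
        List.find?_cons_of_neg (p := fun c' => (headers.map pvKey).contains c') (a := "description") hno1,
        List.find?_cons_of_neg (p := fun c' => (headers.map pvKey).contains c') (a := "text") hno2,
        List.find?_cons_of_neg (p := fun c' => (headers.map pvKey).contains c') (a := "complaint_text") hno3,
        List.find?_cons_of_neg (p := fun c' => (headers.map pvKey).contains c') (a := "issue") hno4,
        List.find?_cons_of_neg (p := fun c' => (headers.map pvKey).contains c') (a := "details") hno5,
        List.find?_cons_of_neg (p := fun c' => (headers.map pvKey).contains c') (a := "message") hno6,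
        List.find?_cons_of_pos (p := fun c' => (headers.map pvKey).contains c') (a := "content") hcontk]

-- ===== VERDICT (by name: the statement is the Claim_ definition above) =====
theorem detect_complaint_column_spec : Claim_equal_detect_complaint_column := by
  intro headers _hdom _hpre
  unfold Spec_detect_complaint_column
  exact pvMain headers
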